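-- pv_equiv track=rewrite | github.com/adrianymeri/Artificial-Intelligence-2022-2023 | SocialGolfers/Backtracking+DFS/SocialGolfers.py | tournamentTables
-- ===== SOURCE A (Python) =====
-- from itertools import combinations,chain
--
-- def arrangeTables(golfers, tables, alreadyPaired):
--
--     result        = [[]] * tables
--     tableNumber   = 0
--     allGolfers    = set(range(1,golfers+1))
--     foursomes     = [combinations(allGolfers,4)]
--
--     while True:
--
--         foursome = next(foursomes[tableNumber],None)
--
--         if foursome:
--
--             foursome = sorted(foursome)
--             pairs    = set(combinations(foursome,2))
--
--             # nese nuk jane taku ata golfers e merr ate kombinim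
--             if pairs.isdisjoint(alreadyPaired):
--
--                 result[tableNumber] = foursome
--                 tableNumber += 1
--
--                 if tableNumber == tables:
--                     break
--
--                 remainingGolfers = allGolfers - set(chain(*result[:tableNumber]))
--                 foursomes.append(combinations(remainingGolfers,4))
--
--             continue
--
--         else:
--
--             tableNumber -= 1
--             foursomes.pop()
--
--             if tableNumber < 0:
--                 return None
--
--             continue
--
--     return result
--
-- def tournamentTables(golfers, tables=None):
--
--     tables  = tables or golfers//4
--     rounds  = []    # lista e katersheve per secilin round
--     paired  = set() # tuples te golfers
--
--     while True:
--
--         # derisa te ekzistojne kombinime te mundshme,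
--         # thirret funksioni arrangeTables
--         roundTables = arrangeTables(golfers,tables,paired)
--
--         if not roundTables:
--             break
--
--         rounds.append(roundTables)
--
--         for foursome in roundTables:
--             pairs = combinations(foursome,2)
--             paired.update(pairs)
--
--     return rounds
-- ===== SOURCE B (Python) =====
-- from itertools import combinations, chain
--
-- def tournamentTables(golfers, tables=None):
--     t = tables or golfers // 4
--
--     def arrange(paired):
--         # recursive backtracking DFS instead of A's explicit iterator stack
--         def helper(chosen):
--             if len(chosen) == t:
--                 return chosen
--             used = set(chain(*chosen))
--             remaining = [g for g in range(1, golfers + 1) if g not in used]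
--             for f in combinations(remaining, 4):
--                 if {p for p in combinations(f, 2)}.isdisjoint(paired):
--                     r = helper(chosen + [list(f)])
--                     if r is not None:
--                         return r
--             return None
--         return helper([])
--
--     rounds = []
--     paired = set()
--     while (rt := arrange(paired)):
--         rounds.append(rt)
--         paired |= {p for f in rt for p in combinations(f, 2)}
--     return rounds
-- ===== Notes on version B (the rewrite author's own statement) =====
-- stated objective: alternative
-- what changed: arrangeTables' explicit stack of live combination iterators with manual push/pop backtracking is replaced by a recursive DFS helper(chosen) that loops over the candidate foursomes of the remaining golfers and recurses, returning the first complete arrangement; same search order, same outer rounds loop.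
-- outside the precondition, e.g. on tournamentTables(8, -1): A raises IndexError, B returns []
import Mathlib
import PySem

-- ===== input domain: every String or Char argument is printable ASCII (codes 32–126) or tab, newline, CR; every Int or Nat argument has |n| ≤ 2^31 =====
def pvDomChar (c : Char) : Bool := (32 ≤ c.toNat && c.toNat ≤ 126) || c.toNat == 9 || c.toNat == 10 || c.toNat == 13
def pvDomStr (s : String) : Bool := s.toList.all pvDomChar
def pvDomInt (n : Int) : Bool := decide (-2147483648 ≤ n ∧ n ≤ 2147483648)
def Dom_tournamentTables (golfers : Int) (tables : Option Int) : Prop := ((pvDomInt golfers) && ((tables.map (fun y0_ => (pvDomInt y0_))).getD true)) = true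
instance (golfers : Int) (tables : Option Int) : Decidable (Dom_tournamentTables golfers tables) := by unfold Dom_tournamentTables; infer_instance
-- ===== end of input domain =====

-- B rewrites A's explicit-iterator-stack backtracking as plain recursive DFS (objective: alternative decomposition, same search order).
-- Python sets of golfer numbers are ported as ascending lists, which is CPython's actual iteration order exactly on the inputs
-- Pre_tournamentTables admits (see the comment at Pre_).

-- ===== PORT A =====
-- itertools.combinations over an ascending list: lexicographic k-subsets (shared library helper, used by both ports)
def pyCombs (l : List Int) (k : Nat) : List (List Int) :=
  match k, l with
  | 0, _ => [[]]
  | _ + 1, [] => []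
  | k + 1, x :: xs => (pyCombs xs k).map (x :: ·) ++ pyCombs xs (k + 1)

-- itertools.combinations(f, 2) as pairs (shared library helper)
def pyPairs : List Int → List (Int × Int)
  | [] => []
  | x :: xs => xs.map (fun y => (x, y)) ++ pyPairs xs

-- A's while-True loop over the stack `foursomes` of live combination iterators (each iterator = its list of
-- not-yet-consumed foursomes, head of `stack` = iterator of the current tableNumber; `chosen` = result[:tableNumber]).
-- The fuel argument is only a totality guard for the loop (arrangeTablesA passes enough for every run).
def machineA (T : Int) (paired : List (Int × Int)) (allG : List Int) :
    Nat → List (List (List Int)) → List (List Int) → Option (List (List Int))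
  | 0, _, _ => none
  | _ + 1, [], _ => none                                   -- tableNumber < 0: return None
  | fuel + 1, [] :: rest, chosen =>                        -- next(...) is None: pop
      machineA T paired allG fuel rest chosen.dropLast
  | fuel + 1, (f :: pend) :: rest, chosen =>
      let fs := PySem.List.sorted f (fun x => x) false     -- foursome = sorted(foursome)
      if PySem.Set.isdisjoint (PySem.Set.ofList (pyPairs fs)) paired then
        let chosen' := chosen ++ [fs]                      -- result[tableNumber] = foursome; tableNumber += 1
        if (chosen'.length : Int) = T then some chosen'    -- tableNumber == tables: break, return result
        else
          machineA T paired allG fuel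
            ((pyCombs (allG.filter (fun x => !(chosen'.flatten.contains x))) 4) :: pend :: rest) chosen'
      else machineA T paired allG fuel (pend :: rest) chosen

def arrangeTablesA (golfers : Int) (T : Int) (paired : List (Int × Int)) : Option (List (List Int)) :=
  let allG := PySem.List.pyRange 1 (golfers + 1) 1         -- set(range(1, golfers+1)), iterated ascending
  machineA T paired allG (((pyCombs allG 4).length + 2) ^ (T.toNat + 3)) [pyCombs allG 4] []

def loopA (golfers T : Int) : Nat → List (List (List Int)) → PySem.Set (Int × Int) → List (List (List Int))
  | 0, rounds, _ => rounds
  | fuel + 1, rounds, paired =>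
      match arrangeTablesA golfers T paired with
      | none => rounds                                     -- if not roundTables: break
      | some rt =>
          if rt = [] then rounds
          else loopA golfers T fuel (rounds ++ [rt])
                 (rt.foldl (fun p f => PySem.Set.update p (pyPairs f)) paired)

def tournamentTables (golfers : Int) (tables : Option Int) : List (List (List Int)) :=
  let T : Int := match tables with                         -- tables = tables or golfers//4
    | none => PySem.Int.floordiv golfers 4
    | some t => if t = 0 then PySem.Int.floordiv golfers 4 else t
  loopA golfers T (golfers.toNat * golfers.toNat + 1) [] []

-- ===== PORT B =====
-- remaining golfers, from Source B's helper: used = set(chain(*chosen)); [g for g in range(1, golfers+1) if g not in used]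
def remB (golfers : Int) (chosen : List (List Int)) : List Int :=
  (PySem.List.pyRange 1 (golfers + 1) 1).filter
    (fun g => !((PySem.Set.ofList chosen.flatten).contains g))

-- Source B's recursive helper(chosen) and its candidate for-loop; fuel is only a totality guard for the recursion depth
mutual
def dfsB (golfers T : Int) (paired : List (Int × Int)) :
    (fuel : Nat) → (chosen : List (List Int)) → Option (List (List Int))
  | 0, _ => none
  | fuel + 1, chosen =>
      if (chosen.length : Int) = T then some chosen
      else tryB golfers T paired fuel (pyCombs (remB golfers chosen) 4) chosen

def tryB (golfers T : Int) (paired : List (Int × Int)) :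
    (fuel : Nat) → (cands : List (List Int)) → (chosen : List (List Int)) → Option (List (List Int))
  | _, [], _ => none
  | fuel, f :: fs, chosen =>
      if PySem.Set.isdisjoint (PySem.Set.ofList (pyPairs f)) paired then
        match dfsB golfers T paired fuel (chosen ++ [f]) with
        | some r => some r
        | none => tryB golfers T paired fuel fs chosen
      else tryB golfers T paired fuel fs chosen
end

def loopB (golfers T : Int) : Nat → List (List (List Int)) → PySem.Set (Int × Int) → List (List (List Int))
  | 0, rounds, _ => rounds
  | fuel + 1, rounds, paired =>
      match dfsB golfers T paired (golfers.toNat + 1) [] with   -- while (rt := arrange(paired)):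
      | none => rounds
      | some rt =>
          if rt = [] then rounds
          else loopB golfers T fuel (rounds ++ [rt])
                 (PySem.Set.union paired (PySem.Set.ofList (rt.flatMap pyPairs)))

def tournamentTables_alt (golfers : Int) (tables : Option Int) : List (List (List Int)) :=
  let T : Int := match tables with                         -- t = tables or golfers // 4
    | none => PySem.Int.floordiv golfers 4
    | some t => if t = 0 then PySem.Int.floordiv golfers 4 else t
  loopB golfers T (golfers.toNat * golfers.toNat + 1) [] []

-- ===== PRECONDITION & SPEC =====
-- effective table count, as in `tables = tables or golfers//4`
def TeffPre (golfers : Int) (tables : Option Int) : Int :=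
  match tables with
  | none => PySem.Int.floordiv golfers 4
  | some t => if t = 0 then PySem.Int.floordiv golfers 4 else t

-- Pre_ excludes (a) inputs where A raises IndexError (an explicit negative table count with golfers ≥ 4: A indexes
-- into the empty list [[]]*tables), and (b) inputs (golfers ≥ 32 with more than one table) on which A's choice among
-- foursomes follows CPython's hash-table iteration order over difference sets, which stops being the ascending order
-- once golfers reaches a set's table size (first at 32) — an accident of the set implementation that no one would
-- specify; B enumerates candidates in ascending (lexicographic) order there.
def Pre_tournamentTables (golfers : Int) (tables : Option Int) : Prop :=
  (golfers < 4 ∨ 0 ≤ TeffPre golfers tables) ∧ (golfers ≤ 31 ∨ TeffPre golfers tables ≤ 1)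
instance (golfers : Int) (tables : Option Int) : Decidable (Pre_tournamentTables golfers tables) := by
  unfold Pre_tournamentTables; infer_instance

def pvWitness_tournamentTables : Int × Option Int := (8, none)

def Spec_tournamentTables (golfers : Int) (tables : Option Int) (out : List (List (List Int))) : Prop := out = tournamentTables_alt golfers tables
instance (golfers : Int) (tables : Option Int) (out : List (List (List Int))) : Decidable (Spec_tournamentTables golfers tables out) := by unfold Spec_tournamentTables; infer_instance

-- ===== CLAIM (what is proved, stated in full; the proofs are below) =====
def Claim_equal_tournamentTables : Prop := ∀ (golfers : Int) (tables : Option Int), Dom_tournamentTables golfers tables → Pre_tournamentTables golfers tables → Spec_tournamentTables golfers tables (tournamentTables golfers tables)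


-- ===== LEMMAS AND PROOFS =====

-- ---- facts about pyCombs ----
lemma pyCombs_length (l : List Int) (k : Nat) : (pyCombs l k).length = l.length.choose k := by
  induction l generalizing k with
  | nil => cases k <;> simp [pyCombs]
  | cons x xs ih =>
    cases k with
    | zero => simp [pyCombs]
    | succ k => simp [pyCombs, ih, Nat.choose_succ_succ]

lemma sublist_of_mem_pyCombs {l f : List Int} {k : Nat} (h : f ∈ pyCombs l k) : f.Sublist l := by
  induction l generalizing k f with
  | nil => cases k <;> simp_all [pyCombs]
  | cons x xs ih =>
    cases k with
    | zero => simp [pyCombs] at h; simp [h]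
    | succ k =>
      simp only [pyCombs, List.mem_append, List.mem_map] at h
      rcases h with ⟨g, hg, rfl⟩ | h
      · exact (ih hg).cons₂ x
      · exact (ih h).cons x

lemma length_of_mem_pyCombs {l f : List Int} {k : Nat} (h : f ∈ pyCombs l k) : f.length = k := by
  induction l generalizing k f with
  | nil => cases k <;> simp_all [pyCombs]
  | cons x xs ih =>
    cases k with
    | zero => simp [pyCombs] at h; simp [h]
    | succ k =>
      simp only [pyCombs, List.mem_append, List.mem_map] at h
      rcases h with ⟨g, hg, rfl⟩ | h
      · simp [ih hg]
      · exact ih h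

lemma pyCombs_nil_of_short {l : List Int} {k : Nat} (h : l.length < k) : pyCombs l k = [] := by
  have := pyCombs_length l k
  rw [Nat.choose_eq_zero_of_lt h] at this
  exact List.eq_nil_of_length_eq_zero this

-- ---- facts about remB ----
lemma remB_nil (g : Int) : remB g [] = PySem.List.pyRange 1 (g + 1) 1 := by
  simp [remB]

lemma remA_eq_remB (g : Int) (c : List (List Int)) :
    (PySem.List.pyRange 1 (g + 1) 1).filter (fun x => !(c.flatten.contains x)) = remB g c := by
  unfold remB
  apply List.filter_congr
  intro x _
  simp [pysem]

lemma remB_sublist (g : Int) (c : List (List Int)) :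
    (remB g c).Sublist (PySem.List.pyRange 1 (g + 1) 1) := by
  unfold remB; apply List.filter_sublist

lemma remB_append (g : Int) (c : List (List Int)) (f : List Int) :
    remB g (c ++ [f]) = (remB g c).filter (fun x => !(f.contains x)) := by
  unfold remB
  rw [List.filter_filter]
  apply List.filter_congr
  intro x _
  simp [pysem]
  exact Bool.and_comm _ _

lemma sorted_eq_self_of_sublist (g : Int) {c : List (List Int)} {f : List Int}
    (h : f.Sublist (remB g c)) : PySem.List.sorted f (fun x => x) false = f :=
  PySem.List.sorted_eq_of_perm_of_pairwise_lt f f (fun x => x) (List.Perm.refl f)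
    (List.Pairwise.sublist (h.trans (remB_sublist g c)) (PySem.List.pairwise_lt_pyRange_one 1 (g + 1)))

lemma remB_shrink (g : Int) {c : List (List Int)} {f : List Int}
    (hs : f.Sublist (remB g c)) (hne : f ≠ []) :
    (remB g (c ++ [f])).length < (remB g c).length := by
  rw [remB_append]
  apply List.length_filter_lt_length_iff_exists.mpr
  rcases f with _ | ⟨x, f'⟩
  · exact absurd rfl hne
  · exact ⟨x, hs.subset (List.mem_cons_self), by simp⟩

-- ---- fuel irrelevance for B's DFS ----
lemma dfs_try_congr (g T : Int) (paired : List (Int × Int)) :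
    ∀ n : Nat, ∀ chosen : List (List Int), (remB g chosen).length ≤ n →
      (∀ f1 f2 : Nat, (remB g chosen).length < f1 → (remB g chosen).length < f2 →
        dfsB g T paired f1 chosen = dfsB g T paired f2 chosen) ∧
      (∀ cands : List (List Int), (∀ f ∈ cands, f.Sublist (remB g chosen) ∧ f ≠ []) →
        ∀ f1 f2 : Nat, (remB g chosen).length ≤ f1 → (remB g chosen).length ≤ f2 →
          tryB g T paired f1 cands chosen = tryB g T paired f2 cands chosen) := by
  intro n
  induction n using Nat.strong_induction_on with
  | _ n ih =>
    intro chosen hn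
    have htry : ∀ cands : List (List Int), (∀ f ∈ cands, f.Sublist (remB g chosen) ∧ f ≠ []) →
        ∀ f1 f2 : Nat, (remB g chosen).length ≤ f1 → (remB g chosen).length ≤ f2 →
          tryB g T paired f1 cands chosen = tryB g T paired f2 cands chosen := by
      intro cands hc
      induction cands with
      | nil => intro f1 f2 _ _; simp [tryB]
      | cons f fs ihc =>
        intro f1 f2 hf1 hf2
        have hcf := hc f List.mem_cons_self
        have hshr : (remB g (chosen ++ [f])).length < (remB g chosen).length :=
          remB_shrink g hcf.1 hcf.2
        have hdfs : dfsB g T paired f1 (chosen ++ [f]) = dfsB g T paired f2 (chosen ++ [f]) :=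
          (ih (remB g (chosen ++ [f])).length (by omega) (chosen ++ [f]) le_rfl).1 f1 f2
            (by omega) (by omega)
        have hfs : ∀ f' ∈ fs, f'.Sublist (remB g chosen) ∧ f' ≠ [] :=
          fun f' hf' => hc f' (List.mem_cons_of_mem f hf')
        simp only [tryB]
        rw [hdfs, ihc hfs f1 f2 hf1 hf2]
    refine ⟨?_, htry⟩
    intro f1 f2 h1 h2
    obtain ⟨a, rfl⟩ : ∃ a, f1 = a + 1 := ⟨f1 - 1, by omega⟩
    obtain ⟨b, rfl⟩ : ∃ b, f2 = b + 1 := ⟨f2 - 1, by omega⟩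
    simp only [dfsB]
    split
    · rfl
    · exact htry (pyCombs (remB g chosen) 4)
        (fun f hf => ⟨sublist_of_mem_pyCombs hf, by
          have := length_of_mem_pyCombs hf
          intro hnil; rw [hnil] at this; simp at this⟩)
        a b (by omega) (by omega)

-- ---- A's machine equals a stitch of B's DFS ----
-- canonical candidate loop (B's for-loop with canonical fuel)
def tryC (g T : Int) (paired : List (Int × Int)) (cands : List (List Int)) (chosen : List (List Int)) :
    Option (List (List Int)) :=
  tryB g T paired (remB g chosen).length cands chosen

-- what A's stack means: try the top iterator at the current prefix, else backtrack
def stitch (g T : Int) (paired : List (Int × Int)) :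
    List (List (List Int)) → List (List Int) → Option (List (List Int))
  | [], _ => none
  | pend :: rest, chosen =>
      match tryC g T paired pend chosen with
      | some r => some r
      | none => stitch g T paired rest chosen.dropLast

-- invariant: each stack entry holds candidates of its table's remaining golfers
def InvS (g : Int) : List (List (List Int)) → List (List Int) → Prop
  | [], _ => True
  | pend :: rest, chosen => (∀ f ∈ pend, f ∈ pyCombs (remB g chosen) 4) ∧ InvS g rest chosen.dropLast

-- the termination potential of A's iterator stack
def meas (base cap : Nat) : List (List (List Int)) → Nat
  | [] => 0
  | pend :: rest => (pend.length + 1) * base ^ (cap - rest.length) + meas base cap rest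

lemma meas_arith (L M p e m fuel : Nat) (hL : L ≤ M)
    (h : (p + 1 + 1) * (M + 2) ^ (e + 1) + m ≤ fuel + 1) :
    (L + 1) * (M + 2) ^ e + ((p + 1) * (M + 2) ^ (e + 1) + m) ≤ fuel := by
  have h1 : (L + 1) * (M + 2) ^ e + (M + 2) ^ e ≤ (M + 2) ^ (e + 1) := by
    calc (L + 1) * (M + 2) ^ e + (M + 2) ^ e = (L + 2) * (M + 2) ^ e := by ring
      _ ≤ (M + 2) * (M + 2) ^ e := Nat.mul_le_mul_right _ (by omega)
      _ = (M + 2) ^ (e + 1) := by rw [pow_succ]; ring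
  have h2 : (p + 1 + 1) * (M + 2) ^ (e + 1) = (p + 1) * (M + 2) ^ (e + 1) + (M + 2) ^ (e + 1) := by
    ring
  have h3 : 1 ≤ (M + 2) ^ e := Nat.one_le_pow _ _ (by omega)
  omega

lemma machine_eq_stitch (g T : Int) (paired : List (Int × Int)) (hT : 1 ≤ T) :
    ∀ (fuel : Nat) (stack : List (List (List Int))) (chosen : List (List Int)),
      InvS g stack chosen →
      stack.length ≤ chosen.length + 1 →
      chosen.length < T.toNat →
      meas ((pyCombs (PySem.List.pyRange 1 (g + 1) 1) 4).length + 2) (T.toNat + 2) stack ≤ fuel →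
      machineA T paired (PySem.List.pyRange 1 (g + 1) 1) fuel stack chosen =
        stitch g T paired stack chosen := by
  intro fuel
  induction fuel with
  | zero =>
    intro stack chosen hinv hst hch hmeas
    cases stack with
    | nil => rfl
    | cons pend rest =>
      exfalso
      have hx : 1 ≤ ((pyCombs (PySem.List.pyRange 1 (g + 1) 1) 4).length + 2) ^
          (T.toNat + 2 - rest.length) := Nat.one_le_pow _ _ (by omega)
      have hp : 1 * 1 ≤ (pend.length + 1) * (((pyCombs (PySem.List.pyRange 1 (g + 1) 1) 4).length + 2) ^
          (T.toNat + 2 - rest.length)) := Nat.mul_le_mul (by omega) hx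
      simp only [meas] at hmeas
      omega
  | succ fuel ihf =>
    intro stack chosen hinv hst hch hmeas
    cases stack with
    | nil => rfl
    | cons pend rest =>
      obtain ⟨hpend, hrest⟩ := hinv
      -- abbreviations
      have hx : 1 ≤ ((pyCombs (PySem.List.pyRange 1 (g + 1) 1) 4).length + 2) ^
          (T.toNat + 2 - rest.length) := Nat.one_le_pow _ _ (by omega)
      cases pend with
      | nil =>
        -- next(...) is None: pop the iterator, machine backtracks
        have hmeas' : meas ((pyCombs (PySem.List.pyRange 1 (g + 1) 1) 4).length + 2)
            (T.toNat + 2) rest ≤ fuel := by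
          simp only [meas, List.length_nil, Nat.zero_add, one_mul] at hmeas; omega
        have hst' : rest.length ≤ chosen.dropLast.length + 1 := by
          rcases chosen with _ | _ <;> simp_all
        show machineA T paired _ fuel rest chosen.dropLast = _
        rw [ihf rest chosen.dropLast hrest hst'
          (by simp only [List.length_dropLast]; omega) hmeas']
        simp [stitch, tryC, tryB]
      | cons f pend' =>
        have hf : f ∈ pyCombs (remB g chosen) 4 := hpend f List.mem_cons_self
        have hsubf : f.Sublist (remB g chosen) := sublist_of_mem_pyCombs hf
        have hlenf : f.length = 4 := length_of_mem_pyCombs hf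
        have hnef : f ≠ [] := by intro h; rw [h] at hlenf; simp at hlenf
        have hremlen : 1 ≤ (remB g chosen).length := by
          rcases hrem : remB g chosen with _ | _
          · rw [hrem] at hsubf; simp [List.sublist_nil] at hsubf; exact absurd hsubf hnef
          · simp
        obtain ⟨m, hm⟩ : ∃ m, (remB g chosen).length = m + 1 :=
          ⟨(remB g chosen).length - 1, by omega⟩
        simp only [machineA, sorted_eq_self_of_sublist g hsubf]
        cases hdj : PySem.Set.isdisjoint (PySem.Set.ofList (pyPairs f)) paired with
        | false =>
          -- pair clash: try the next foursome of this iterator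
          simp only [Bool.false_eq_true, if_false]
          have hmeas' : meas ((pyCombs (PySem.List.pyRange 1 (g + 1) 1) 4).length + 2)
              (T.toNat + 2) (pend' :: rest) ≤ fuel := by
            simp only [meas, List.length_cons] at hmeas ⊢
            have h2 : (pend'.length + 1 + 1) * (((pyCombs (PySem.List.pyRange 1 (g + 1) 1) 4).length + 2) ^
                (T.toNat + 2 - rest.length)) = (pend'.length + 1) * (((pyCombs (PySem.List.pyRange 1 (g + 1) 1) 4).length + 2) ^
                (T.toNat + 2 - rest.length)) + (((pyCombs (PySem.List.pyRange 1 (g + 1) 1) 4).length + 2) ^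
                (T.toNat + 2 - rest.length)) := by ring
            omega
          rw [ihf (pend' :: rest) chosen
            ⟨fun f' hf' => hpend f' (List.mem_cons_of_mem f hf'), hrest⟩
            (by simpa using hst) hch hmeas']
          simp only [stitch, tryC, hm, tryB, hdj, Bool.false_eq_true, if_false]
        | true =>
          simp only [if_true]
          by_cases hTeq : ((chosen ++ [f]).length : Int) = T
          · -- table filled to tables: break and return
            rw [if_pos hTeq]
            simp only [stitch, tryC, hm, tryB, hdj, dfsB, hTeq, if_pos]
          · -- recurse into the pushed iterator of the next table
            rw [if_neg hTeq]
            have hch' : (chosen ++ [f]).length < T.toNat := by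
              have hne : ((chosen ++ [f]).length : Int) ≠ T := hTeq
              simp only [List.length_append, List.length_cons, List.length_nil] at hne ⊢
              omega
            have hpush : (PySem.List.pyRange 1 (g + 1) 1).filter
                (fun x => !((chosen ++ [f]).flatten.contains x)) = remB g (chosen ++ [f]) :=
              remA_eq_remB g (chosen ++ [f])
            have hshr : (remB g (chosen ++ [f])).length < (remB g chosen).length :=
              remB_shrink g hsubf hnef
            have hLle : (pyCombs (remB g (chosen ++ [f])) 4).length ≤
                (pyCombs (PySem.List.pyRange 1 (g + 1) 1) 4).length := by
              rw [pyCombs_length, pyCombs_length]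
              exact Nat.choose_le_choose 4 ((remB_sublist g (chosen ++ [f])).length_le)
            have hmeas' : meas ((pyCombs (PySem.List.pyRange 1 (g + 1) 1) 4).length + 2)
                (T.toNat + 2) ((pyCombs (remB g (chosen ++ [f])) 4) :: pend' :: rest) ≤ fuel := by
              have hrr : rest.length < T.toNat + 1 := by
                simp only [List.length_cons] at hst; omega
              have he : T.toNat + 2 - rest.length = (T.toNat + 2 - (rest.length + 1)) + 1 := by
                omega
              simp only [meas, List.length_cons] at hmeas ⊢
              rw [he] at hmeas ⊢
              exact meas_arith _ _ _ _ _ _ hLle hmeas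
            rw [hpush, ihf ((pyCombs (remB g (chosen ++ [f])) 4) :: pend' :: rest) (chosen ++ [f])
              ⟨fun f' hf' => hf', by
                rw [List.dropLast_concat]
                exact ⟨fun f' hf' => hpend f' (List.mem_cons_of_mem f hf'), hrest⟩⟩
              (by simp only [List.length_cons, List.length_append, List.length_nil] at hst ⊢; omega)
              hch' hmeas']
            -- both sides now stitch; peel one level of B's DFS on the left
            have hcongr := (dfs_try_congr g T paired (remB g (chosen ++ [f])).length
                (chosen ++ [f]) le_rfl).2 (pyCombs (remB g (chosen ++ [f])) 4)
                (fun f' hf' => ⟨sublist_of_mem_pyCombs hf', by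
                  have := length_of_mem_pyCombs hf'
                  intro hnil; rw [hnil] at this; simp at this⟩)
                m (remB g (chosen ++ [f])).length (by omega) le_rfl
            simp only [stitch, tryC, hm, tryB, hdj, if_true, dfsB, hTeq, ite_false,
              List.dropLast_concat, hcongr]
            cases tryB g T paired (remB g (chosen ++ [f])).length
              (pyCombs (remB g (chosen ++ [f])) 4) (chosen ++ [f]) <;> rfl
  

-- ---- the two rounds procedures agree ----
lemma arrange_eq (g T : Int) (paired : List (Int × Int)) (hT : 1 ≤ T) :
    arrangeTablesA g T paired = dfsB g T paired (g.toNat + 1) [] := by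
  have hrem : remB g [] = PySem.List.pyRange 1 (g + 1) 1 := remB_nil g
  have hlen : (remB g []).length = g.toNat := by
    rw [hrem, PySem.List.length_pyRange_one]; omega
  have hinv : InvS g [pyCombs (PySem.List.pyRange 1 (g + 1) 1) 4] [] :=
    ⟨fun f hf => by rw [hrem]; exact hf, trivial⟩
  have hmeas : meas ((pyCombs (PySem.List.pyRange 1 (g + 1) 1) 4).length + 2) (T.toNat + 2)
      [pyCombs (PySem.List.pyRange 1 (g + 1) 1) 4] ≤
      ((pyCombs (PySem.List.pyRange 1 (g + 1) 1) 4).length + 2) ^ (T.toNat + 3) := by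
    simp only [meas, List.length_nil, Nat.sub_zero, Nat.add_zero]
    calc ((pyCombs (PySem.List.pyRange 1 (g + 1) 1) 4).length + 1) *
          ((pyCombs (PySem.List.pyRange 1 (g + 1) 1) 4).length + 2) ^ (T.toNat + 2)
        ≤ ((pyCombs (PySem.List.pyRange 1 (g + 1) 1) 4).length + 2) *
          ((pyCombs (PySem.List.pyRange 1 (g + 1) 1) 4).length + 2) ^ (T.toNat + 2) :=
          Nat.mul_le_mul_right _ (by omega)
      _ = ((pyCombs (PySem.List.pyRange 1 (g + 1) 1) 4).length + 2) ^ (T.toNat + 3) := by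
          rw [← pow_succ']
  have hms := machine_eq_stitch g T paired hT
    (((pyCombs (PySem.List.pyRange 1 (g + 1) 1) 4).length + 2) ^ (T.toNat + 3))
    [pyCombs (PySem.List.pyRange 1 (g + 1) 1) 4] [] hinv (by simp) (by simp; omega) hmeas
  show machineA T paired (PySem.List.pyRange 1 (g + 1) 1)
      (((pyCombs (PySem.List.pyRange 1 (g + 1) 1) 4).length + 2) ^ (T.toNat + 3))
      [pyCombs (PySem.List.pyRange 1 (g + 1) 1) 4] [] = _
  rw [hms]
  have hT0 : ¬ (([] : List (List Int)).length : Int) = T := by simp; omega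
  have hcongr := (dfs_try_congr g T paired (remB g []).length [] le_rfl).2
    (pyCombs (remB g []) 4)
    (fun f hf => ⟨sublist_of_mem_pyCombs hf, by
      have := length_of_mem_pyCombs hf
      intro hnil; rw [hnil] at this; simp at this⟩)
    g.toNat (remB g []).length (by omega) le_rfl
  simp only [dfsB, hT0, ite_false, stitch, tryC]
  rw [← hrem, hcongr]
  cases tryB g T paired (remB g []).length (pyCombs (remB g []) 4) [] <;> rfl

lemma arrange_eq_low (g T : Int) (paired : List (Int × Int)) (hg : g < 4) (hT : T ≤ 0) :
    arrangeTablesA g T paired = none ∧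
      dfsB g T paired (g.toNat + 1) [] = (if (0 : Int) = T then some [] else none) := by
  have hlen : (PySem.List.pyRange 1 (g + 1) 1).length < 4 := by
    rw [PySem.List.length_pyRange_one]; omega
  have hnil : pyCombs (PySem.List.pyRange 1 (g + 1) 1) 4 = [] := pyCombs_nil_of_short hlen
  have htn : T.toNat = 0 := by omega
  constructor
  · show machineA T paired (PySem.List.pyRange 1 (g + 1) 1)
        (((pyCombs (PySem.List.pyRange 1 (g + 1) 1) 4).length + 2) ^ (T.toNat + 3))
        [pyCombs (PySem.List.pyRange 1 (g + 1) 1) 4] [] = none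
    rw [hnil, htn]
    rfl
  · simp only [dfsB]
    split
    · rename_i h
      simp only [List.length_nil, Int.natCast_zero] at h
      rw [if_pos h]
    · rename_i h
      simp only [List.length_nil, Int.natCast_zero] at h
      rw [if_neg h, remB_nil, hnil]
      simp [tryB]

-- ---- the paired-set updates agree ----
lemma update_ofList (s : PySem.Set (Int × Int)) (l : List (Int × Int)) :
    PySem.Set.update s (PySem.Set.ofList l) = PySem.Set.update s l := by
  rw [PySem.Set.update_eq_append_filter, PySem.Set.update_eq_append_filter,
    PySem.Set.ofList_ofList]

lemma paired_update_eq (rt : List (List Int)) (paired : PySem.Set (Int × Int)) :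
    rt.foldl (fun p f => PySem.Set.update p (pyPairs f)) paired =
      PySem.Set.union paired (PySem.Set.ofList (rt.flatMap pyPairs)) := by
  induction rt generalizing paired with
  | nil => simp [PySem.Set.union, PySem.Set.update_nil]
  | cons f rt ihr =>
    show rt.foldl _ (PySem.Set.update paired (pyPairs f)) = _
    rw [ihr]
    show PySem.Set.update _ _ = PySem.Set.update _ _
    rw [update_ofList, update_ofList, List.flatMap_cons, PySem.Set.update_append]

lemma loop_eq (g T : Int) (hpre : g < 4 ∨ 1 ≤ T) :
    ∀ (fuel : Nat) (rounds : List (List (List Int))) (paired : PySem.Set (Int × Int)),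
      loopA g T fuel rounds paired = loopB g T fuel rounds paired := by
  intro fuel
  induction fuel with
  | zero => intro rounds paired; rfl
  | succ fuel ihf =>
    intro rounds paired
    by_cases hT : 1 ≤ T
    · show (match arrangeTablesA g T paired with
        | none => rounds
        | some rt => if rt = [] then rounds
            else loopA g T fuel (rounds ++ [rt])
              (rt.foldl (fun p f => PySem.Set.update p (pyPairs f)) paired)) = _
      rw [arrange_eq g T paired hT]
      show _ = (match dfsB g T paired (g.toNat + 1) [] with
        | none => rounds
        | some rt => if rt = [] then rounds
            else loopB g T fuel (rounds ++ [rt])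
              (PySem.Set.union paired (PySem.Set.ofList (rt.flatMap pyPairs))))
      cases dfsB g T paired (g.toNat + 1) [] with
      | none => rfl
      | some rt =>
        by_cases hrt : rt = []
        · simp [hrt]
        · simp only [hrt, ite_false]
          rw [paired_update_eq, ihf]
    · have hg : g < 4 := by rcases hpre with h | h; exact h; omega
      obtain ⟨ha, hb⟩ := arrange_eq_low g T paired hg (by omega)
      show (match arrangeTablesA g T paired with
        | none => rounds
        | some rt => if rt = [] then rounds
            else loopA g T fuel (rounds ++ [rt])
              (rt.foldl (fun p f => PySem.Set.update p (pyPairs f)) paired)) = _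
      rw [ha]
      show rounds = (match dfsB g T paired (g.toNat + 1) [] with
        | none => rounds
        | some rt => if rt = [] then rounds
            else loopB g T fuel (rounds ++ [rt])
              (PySem.Set.union paired (PySem.Set.ofList (rt.flatMap pyPairs))))
      rw [hb]
      by_cases h0 : (0 : Int) = T
      · rw [if_pos h0]; rfl
      · rw [if_neg h0]

-- ===== VERDICT (by name: the statement is the Claim_ definition above) =====
theorem tournamentTables_spec : Claim_equal_tournamentTables := by
  intro golfers tables _ hpre
  unfold Spec_tournamentTables tournamentTables tournamentTables_alt
  obtain ⟨h1, h2⟩ := hpre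
  have hkey : golfers < 4 ∨ 1 ≤ TeffPre golfers tables := by
    rcases h1 with h | h
    · exact Or.inl h
    · by_cases hg : golfers < 4
      · exact Or.inl hg
      · right
        unfold TeffPre at h ⊢
        have hfd : 1 ≤ PySem.Int.floordiv golfers 4 := by
          rw [PySem.Int.le_floordiv_iff_mul_le (by omega)]; omega
        cases tables with
        | none => exact hfd
        | some t =>
          by_cases ht : t = 0
          · simp only [ht] at h ⊢; exact hfd
          · simp only [if_neg ht] at h ⊢; omega
  exact loop_eq golfers (TeffPre golfers tables) hkey _ [] []
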